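-- pv_equiv track=rewrite | github.com/VictoriousWealth/commitscope | src/commitscope/analysis/metrics.py | _encode_known_text_classes
-- ===== SOURCE A (Python) =====
-- from collections import defaultdict
--
-- ARG_SEPARATOR = "\x1f"
--
-- CLASS_NAME_SEPARATOR = "\x1e"
--
-- CLASS_LIST_SEPARATOR = "\x1d"
--
-- def _encode_known_text_classes(known_class_names: set[str], relative_path: str) -> str:
--     entries: dict[str, set[str]] = defaultdict(set)
--     for qualified_name in known_class_names:
--         class_name = qualified_name.rsplit(".", maxsplit=1)[-1]
--         entries[class_name].add(qualified_name)
--     return ARG_SEPARATOR.join(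
--         f"{class_name}{CLASS_NAME_SEPARATOR}{CLASS_LIST_SEPARATOR.join(sorted(qualified_names))}"
--         for class_name, qualified_names in sorted(entries.items())
--     )
-- ===== SOURCE B (Python) =====
-- ARG_SEPARATOR = "\x1f"
-- CLASS_NAME_SEPARATOR = "\x1e"
-- CLASS_LIST_SEPARATOR = "\x1d"
--
--
-- def _encode_known_text_classes(known_class_names: set[str], relative_path: str) -> str:
--     ordered = sorted(known_class_names, key=lambda q: (q.rsplit(".", maxsplit=1)[-1], q))
--     blocks: list[tuple[str, list[str]]] = []
--     current = None
--     for q in ordered: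
--         k = q.rsplit(".", maxsplit=1)[-1]
--         if current is not None and current[0] == k:
--             current[1].append(q)
--         else:
--             if current is not None:
--                 blocks.append(current)
--             current = (k, [q])
--     if current is not None:
--         blocks.append(current)
--     return ARG_SEPARATOR.join(
--         k + CLASS_NAME_SEPARATOR + CLASS_LIST_SEPARATOR.join(g) for k, g in blocks
--     )
-- ===== Notes on version B (the rewrite author's own statement) =====
-- stated objective: alternative
-- what changed: B drops A's defaultdict-of-sets grouping and per-group sorts: it sorts the names once by the (suffix, name) pair and emits blocks in a single linear pass that closes a block whenever the suffix changes.
import Mathlib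
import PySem

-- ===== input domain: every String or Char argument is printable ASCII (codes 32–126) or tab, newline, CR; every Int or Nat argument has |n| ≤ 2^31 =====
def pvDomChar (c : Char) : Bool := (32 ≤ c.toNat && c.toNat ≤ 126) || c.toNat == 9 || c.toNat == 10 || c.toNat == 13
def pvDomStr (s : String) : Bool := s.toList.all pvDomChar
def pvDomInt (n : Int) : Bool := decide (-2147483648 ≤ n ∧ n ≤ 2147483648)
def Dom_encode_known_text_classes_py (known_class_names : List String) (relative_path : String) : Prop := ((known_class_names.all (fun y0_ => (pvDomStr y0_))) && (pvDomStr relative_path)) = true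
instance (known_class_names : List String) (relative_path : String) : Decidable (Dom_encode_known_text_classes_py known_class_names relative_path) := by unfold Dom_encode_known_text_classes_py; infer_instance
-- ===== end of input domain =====

set_option maxRecDepth 8192


-- B replaces A's defaultdict-of-sets grouping (plus a sort of the items and a sort per group) by one
-- sort keyed on (suffix, name) followed by a single linear pass that closes a block whenever the
-- suffix changes — no dictionary is maintained; objective: alternative decomposition of the same cost.
-- (Equivalence is about the return value; neither version mutates its arguments.)

-- ===== PORT A =====
-- shared helper: hand port of q.rsplit(".", maxsplit=1)[-1] — the characters after the LAST '.',
-- the whole string if it has no '.' (exact: rsplit with maxsplit=1 cuts at the last separator only).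
def pvKey (s : String) : String := String.mk ((s.toList.reverse.takeWhile (fun c => c != '.')).reverse)

-- entries[class_name].add(qualified_name) on a defaultdict(set) is Dict.modify with default ∅;
-- sorted(entries.items()) is ported with key (·.1): dict keys are distinct, so Python's tuple
-- comparison never reaches the second components (the sets).
def encode_known_text_classes_py (known_class_names : List String) (relative_path : String) : String :=
  PySem.Str.join "\x1f"
    ((PySem.List.sorted
        (known_class_names.foldl
          (fun d q => d.modify (pvKey q) PySem.Set.empty (fun s => s.add q))
          (PySem.Dict.empty : PySem.Dict String (PySem.Set String))).items
        (fun p => p.1)).map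
      (fun p => p.1 ++ "\x1e" ++ PySem.Str.join "\x1d" (PySem.List.sorted p.2 (fun q => q))))

-- ===== PORT B =====
-- one step of B's loop over the sorted names: extend the open block if the suffix matches,
-- otherwise close it (append it to blocks) and open a fresh one
def pvGroupStep (st : List (String × List String) × Option (String × List String)) (q : String) :
    List (String × List String) × Option (String × List String) :=
  match st with
  | (bs, some (k, g)) =>
    if k = pvKey q then (bs, some (k, g ++ [q]))
    else (bs ++ [(k, g)], some (pvKey q, [q]))
  | (bs, none) => (bs, some (pvKey q, [q]))

-- after the loop: append the still-open block, if any
def pvFinish (st : List (String × List String) × Option (String × List String)) :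
    List (String × List String) :=
  match st.2 with
  | none => st.1
  | some b => st.1 ++ [b]

-- sorted(..., key=lambda q: (suffix, q)) is ported with the lexicographic key toLex (pvKey q, q):
-- Python's tuple comparison on (str, str) is exactly the lexicographic order on String ×ₗ String
def encode_known_text_classes_py_alt (known_class_names : List String) (relative_path : String) : String :=
  PySem.Str.join "\x1f"
    ((pvFinish
        ((PySem.List.sorted known_class_names (fun q => toLex (pvKey q, q))).foldl
          pvGroupStep ([], none))).map
      (fun b => b.1 ++ "\x1e" ++ PySem.Str.join "\x1d" b.2))

-- ===== PRECONDITION & SPEC =====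
-- The Python parameter is a set[str]; a Lean list with duplicate elements represents no Python
-- input, so Pre_ requires the list of distinct set elements to be duplicate-free.
def Pre_encode_known_text_classes_py (known_class_names : List String) (relative_path : String) : Prop :=
  known_class_names.Nodup
instance (known_class_names : List String) (relative_path : String) : Decidable (Pre_encode_known_text_classes_py known_class_names relative_path) := by unfold Pre_encode_known_text_classes_py; infer_instance

def pvWitness_encode_known_text_classes_py : List String × String := (["pkg.mod.C", "other.C", "D"], "src/x.py")

def Spec_encode_known_text_classes_py (known_class_names : List String) (relative_path : String) (out : String) : Prop := out = encode_known_text_classes_py_alt known_class_names relative_path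
instance (known_class_names : List String) (relative_path : String) (out : String) : Decidable (Spec_encode_known_text_classes_py known_class_names relative_path out) := by unfold Spec_encode_known_text_classes_py; infer_instance

-- ===== CLAIM (what is proved, stated in full; the proofs are below) =====
def Claim_equal_encode_known_text_classes_py : Prop := ∀ (known_class_names : List String) (relative_path : String), Dom_encode_known_text_classes_py known_class_names relative_path → Pre_encode_known_text_classes_py known_class_names relative_path → Spec_encode_known_text_classes_py known_class_names relative_path (encode_known_text_classes_py known_class_names relative_path)

-- ===== LEMMAS AND PROOFS =====

-- ---- A-side: the grouping dict characterised ----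

-- getD of A's grouping fold: the group of key k collects exactly the names whose key is k.
theorem pv_foldA_getD (l : List String) (d : PySem.Dict String (PySem.Set String)) (k : String) :
    (l.foldl (fun d q => d.modify (pvKey q) PySem.Set.empty (fun s => s.add q)) d).getD k PySem.Set.empty
      = (l.filter (fun q => pvKey q == k)).foldl PySem.Set.add (d.getD k PySem.Set.empty) := by
  induction l generalizing d with
  | nil => rfl
  | cons q l ih =>
    simp only [List.foldl_cons, List.filter_cons, ih]
    by_cases h : pvKey q = k
    · subst h
      simp [PySem.Dict.getD_modify_self]
    · have hne : k ≠ pvKey q := fun hk => h hk.symm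
      rw [PySem.Dict.modify, PySem.Dict.getD_insert_of_ne _ _ _ hne]
      simp [h]

-- folding Set.add over fresh, duplicate-free elements just appends them
theorem pv_foldl_add_fresh (l : List String) (acc : PySem.Set String)
    (hn : l.Nodup) (hf : ∀ x ∈ l, x ∉ acc) :
    l.foldl PySem.Set.add acc = acc ++ l := by
  induction l generalizing acc with
  | nil => simp
  | cons x l ih =>
    have hxm : x ∉ acc := hf x List.mem_cons_self
    have hadd : PySem.Set.add acc x = acc ++ [x] := by
      simp [PySem.Set.add, hxm]
    have hfresh : ∀ y ∈ l, y ∉ acc ++ [x] := by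
      intro y hy
      simp only [List.mem_append, List.mem_singleton]
      rintro (h | rfl)
      · exact hf y (List.mem_cons_of_mem _ hy) h
      · exact (List.nodup_cons.mp hn).1 hy
    rw [List.foldl_cons, hadd, ih (acc ++ [x]) (List.nodup_cons.mp hn).2 hfresh]
    simp

theorem pv_ofList_nodup (l : List String) (hn : l.Nodup) : PySem.Set.ofList l = l := by
  have : PySem.Set.ofList l = List.foldl PySem.Set.add PySem.Set.empty l := rfl
  rw [this, pv_foldl_add_fresh l PySem.Set.empty hn (by intro x _ hx; exact (List.not_mem_nil) hx)]
  rfl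

-- insertion into a mapped list commutes with the map when the comparator factors through f
theorem pv_insertBy_map {α β : Type} (f : α → β) (before : β → β → Bool) (x : α) (m : List α) :
    PySem.List.insertBy before (f x) (m.map f)
      = (PySem.List.insertBy (fun a b => before (f a) (f b)) x m).map f := by
  induction m with
  | nil => rfl
  | cons y m ih =>
    simp only [List.map_cons, PySem.List.insertBy]
    by_cases h : before (f x) (f y)
    · simp [h]
    · simp [h, ih]

-- sorting a mapped list = mapping the list sorted by the composed key
theorem pv_sorted_map {α β κ : Type} [LT κ] [DecidableLT κ] (f : α → β) (keyb : β → κ)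
    (l : List α) :
    PySem.List.sorted (l.map f) keyb = (PySem.List.sorted l (fun a => keyb (f a))).map f := by
  simp only [PySem.List.sorted, if_neg (by simp : ¬ (false = true))]
  suffices h : ∀ (m : List α),
      (l.map f).foldl (fun acc x => PySem.List.insertBy (fun a b => decide (keyb a < keyb b)) x acc) (m.map f)
        = (l.foldl (fun acc x => PySem.List.insertBy (fun a b => decide (keyb (f a) < keyb (f b))) x acc) m).map f by
    simpa using h []
  induction l with
  | nil => intro m; rfl
  | cons x l ih =>
    intro m
    simp only [List.map_cons, List.foldl_cons, pv_insertBy_map f (fun a b => decide (keyb a < keyb b)) x m]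
    exact ih _

-- a duplicate-free list that is pairwise ≤ is pairwise <
theorem pv_pairwise_lt {κ : Type} [LinearOrder κ] (l : List κ)
    (hle : l.Pairwise (· ≤ ·)) (hnd : l.Nodup) : l.Pairwise (· < ·) :=
  (hle.and hnd).imp (fun h => lt_of_le_of_ne h.1 h.2)

-- sorting (by identity) two duplicate-free lists with the same members gives the same list
theorem pv_sorted_eq_of_same_mem (K K' : List String) (hK : K.Nodup) (hK' : K'.Nodup)
    (hm : ∀ a, a ∈ K ↔ a ∈ K') :
    PySem.List.sorted K (fun s => s) = PySem.List.sorted K' (fun s => s) := by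
  have hperm : K'.Perm K := ((List.perm_ext_iff_of_nodup hK' hK).mpr (fun a => (hm a).symm))
  have hsp : (PySem.List.sorted K' (fun s : String => s)).Perm K :=
    (PySem.List.sorted_perm K' (fun s => s) false).trans hperm
  apply PySem.List.sorted_eq_of_perm_of_pairwise_lt K (PySem.List.sorted K' (fun s => s)) (fun s => s) hsp
  · exact pv_pairwise_lt _ (PySem.List.sorted_pairwise K' (fun s : String => s))
      (((PySem.List.sorted_perm K' (fun s => s) false).nodup_iff).mpr hK')

-- A reduced to the canonical form: sorted distinct suffixes, each with its sorted filtered group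
theorem pv_A_canon (names : List String) (rel : String) (hpre : names.Nodup) :
    encode_known_text_classes_py names rel
      = PySem.Str.join "\x1f"
          ((PySem.List.sorted (PySem.Set.ofList (names.map pvKey)) (fun s => s)).map
            (fun k => k ++ "\x1e" ++ PySem.Str.join "\x1d"
              (PySem.List.sorted (names.filter (fun q => pvKey q == k)) (fun q => q)))) := by
  unfold encode_known_text_classes_py
  set entries : PySem.Dict String (PySem.Set String) :=
    names.foldl (fun d q => d.modify (pvKey q) PySem.Set.empty (fun s => s.add q))
      (PySem.Dict.empty : PySem.Dict String (PySem.Set String)) with hentries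
  have hkeys : entries.keys = PySem.Set.update ([] : PySem.Set String) (names.map pvKey) := by
    rw [hentries,
      PySem.Dict.keys_foldl_modify_key names pvKey PySem.Set.empty (fun _ q s => s.add q) PySem.Dict.empty]
    rfl
  have hknd : entries.keys.Nodup := by
    rw [hentries]
    exact PySem.Dict.nodup_keys_foldl_modify_key names pvKey PySem.Set.empty
      (fun _ q s => s.add q) PySem.Dict.empty List.nodup_nil
  have hgetD : ∀ k, entries.getD k PySem.Set.empty = names.filter (fun q => pvKey q == k) := by
    intro k
    rw [hentries, pv_foldA_getD]
    have : (PySem.Dict.empty : PySem.Dict String (PySem.Set String)).getD k PySem.Set.empty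
        = PySem.Set.empty := rfl
    rw [this]
    exact pv_ofList_nodup _ (hpre.filter _)
  have hitems : entries.items
      = entries.keys.map (fun k => (k, names.filter (fun q => pvKey q == k))) := by
    rw [PySem.Dict.items_eq_map_keys entries hknd PySem.Set.empty]
    exact List.map_congr_left (fun k _ => by rw [hgetD k])
  rw [hitems, pv_sorted_map (fun k => (k, names.filter (fun q => pvKey q == k))) (fun p => p.1) entries.keys]
  rw [pv_sorted_eq_of_same_mem entries.keys (PySem.Set.ofList (names.map pvKey)) hknd
        (PySem.Set.nodup_ofList _)
        (by
          intro a
          rw [hkeys, PySem.Set.mem_ofList, PySem.Set.mem_update]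
          simp)]
  rw [List.map_map]
  rfl

-- ---- B-side: the linear grouping pass characterised ----

-- adjacent grouping by pvKey, as a structural recursion (proof-only reformulation of B's loop)
def pvGroups : List String → List (String × List String)
  | [] => []
  | q :: l =>
    match pvGroups l with
    | [] => [(pvKey q, [q])]
    | (k, g) :: bs => if pvKey q = k then (k, q :: g) :: bs else (pvKey q, [q]) :: (k, g) :: bs

-- merging a pending block into the front of an already-grouped list
def pvMerge (b : String × List String) (bs : List (String × List String)) :
    List (String × List String) :=
  match bs with
  | [] => [b]
  | (k', g') :: rest => if k' = b.1 then (b.1, b.2 ++ g') :: rest else b :: (k', g') :: rest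

theorem pvMerge_nil (b : String × List String) : pvMerge b [] = [b] := rfl

theorem pvMerge_cons_eq (b : String × List String) (k' : String) (g' : List String)
    (rest : List (String × List String)) (h : k' = b.1) :
    pvMerge b ((k', g') :: rest) = (b.1, b.2 ++ g') :: rest := by
  rw [show pvMerge b ((k', g') :: rest)
      = if k' = b.1 then (b.1, b.2 ++ g') :: rest else b :: (k', g') :: rest from rfl, if_pos h]

theorem pvMerge_cons_ne (b : String × List String) (k' : String) (g' : List String)
    (rest : List (String × List String)) (h : ¬ (k' = b.1)) :
    pvMerge b ((k', g') :: rest) = b :: (k', g') :: rest := by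
  rw [show pvMerge b ((k', g') :: rest)
      = if k' = b.1 then (b.1, b.2 ++ g') :: rest else b :: (k', g') :: rest from rfl, if_neg h]

theorem pvGroups_cons (q : String) (l : List String) :
    pvGroups (q :: l) = pvMerge (pvKey q, [q]) (pvGroups l) := by
  rcases hgl : pvGroups l with _ | ⟨⟨k2, g2⟩, rest⟩
  · simp [pvGroups, pvMerge, hgl]
  · by_cases h2 : pvKey q = k2
    · subst h2
      simp [pvGroups, pvMerge, hgl]
    · have h2' : ¬ (k2 = pvKey q) := fun he => h2 he.symm
      simp [pvGroups, pvMerge, hgl, h2, h2']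

theorem pv_merge_absorb (q k : String) (g : List String) (h : k = pvKey q)
    (G : List (String × List String)) :
    pvMerge (k, g ++ [q]) G = pvMerge (k, g) (pvMerge (pvKey q, [q]) G) := by
  subst h
  rcases G with _ | ⟨⟨k2, g2⟩, rest⟩
  · rw [pvMerge_nil, pvMerge_nil, pvMerge_cons_eq _ _ _ _ rfl]
  · by_cases h2 : k2 = pvKey q
    · subst h2
      rw [pvMerge_cons_eq _ _ _ _ rfl, pvMerge_cons_eq _ _ _ _ rfl, pvMerge_cons_eq _ _ _ _ rfl]
      show (pvKey q, (g ++ [q]) ++ g2) :: rest = (pvKey q, g ++ ([q] ++ g2)) :: rest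
      rw [List.append_assoc]
    · rw [pvMerge_cons_ne _ _ _ _ h2, pvMerge_cons_ne _ _ _ _ h2, pvMerge_cons_eq _ _ _ _ rfl]

theorem pv_merge_prepend (q k : String) (g : List String) (h : ¬ (pvKey q = k))
    (G : List (String × List String)) :
    pvMerge (k, g) (pvMerge (pvKey q, [q]) G) = (k, g) :: pvMerge (pvKey q, [q]) G := by
  rcases G with _ | ⟨⟨k2, g2⟩, rest⟩
  · rw [pvMerge_nil, pvMerge_cons_ne _ _ _ _ h]
  · by_cases h2 : k2 = pvKey q
    · rw [pvMerge_cons_eq _ _ _ _ h2, pvMerge_cons_ne _ _ _ _ h]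
    · rw [pvMerge_cons_ne _ _ _ _ h2, pvMerge_cons_ne _ _ _ _ h]

theorem pv_fold_merge (l : List String) :
    ∀ (bs : List (String × List String)) (k : String) (g : List String),
      pvFinish (l.foldl pvGroupStep (bs, some (k, g))) = bs ++ pvMerge (k, g) (pvGroups l) := by
  induction l with
  | nil => intro bs k g; rfl
  | cons q l ih =>
    intro bs k g
    rw [List.foldl_cons, pvGroups_cons]
    by_cases h : k = pvKey q
    · rw [show pvGroupStep (bs, some (k, g)) q = (bs, some (k, g ++ [q])) by simp [pvGroupStep, h],
        ih, pv_merge_absorb q k g h (pvGroups l)]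
    · rw [show pvGroupStep (bs, some (k, g)) q = (bs ++ [(k, g)], some (pvKey q, [q])) by
          simp [pvGroupStep, h],
        ih, pv_merge_prepend q k g (fun he => h he.symm) (pvGroups l)]
      simp

theorem pv_fold_groups (l : List String) :
    pvFinish (l.foldl pvGroupStep ([], none)) = pvGroups l := by
  cases l with
  | nil => rfl
  | cons q l =>
    rw [List.foldl_cons, show pvGroupStep ([], none) q = ([], some (pvKey q, [q])) from rfl,
      pv_fold_merge, pvGroups_cons]
    rfl

-- for a sorted list, dedup pulls the minimal element (which occurs) to the front
theorem pv_dedup_sorted_cons (xs : List String) (x : String)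
    (hm : x ∈ xs) (hb : ∀ y ∈ xs, x ≤ y) (hp : xs.Pairwise (· ≤ ·)) :
    xs.dedup = x :: (xs.filter (fun y => y ≠ x)).dedup := by
  induction xs with
  | nil => cases hm
  | cons a l ih =>
    have hax : a = x := by
      refine le_antisymm ?_ (hb a List.mem_cons_self)
      rcases List.mem_cons.mp hm with rfl | hxl
      · exact le_rfl
      · exact (List.pairwise_cons.mp hp).1 x hxl
    subst hax
    have hfc : (a :: l).filter (fun y => y ≠ a) = l.filter (fun y => y ≠ a) := by
      simp
    by_cases hal : a ∈ l
    · rw [List.dedup_cons_of_mem hal, hfc]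
      exact ih hal (fun y hy => (List.pairwise_cons.mp hp).1 y hy) (List.pairwise_cons.mp hp).2
    · rw [List.dedup_cons_of_notMem hal, hfc]
      have : l.filter (fun y => y ≠ a) = l := by
        apply List.filter_eq_self.mpr
        intro y hy
        simp only [decide_eq_true_eq]
        exact fun hya => hal (hya ▸ hy)
      rw [this]

-- adjacent grouping of a list whose keys are sorted = one block per distinct key, with its filter
theorem pv_groups_eq (l : List String) (hs : (l.map pvKey).Pairwise (· ≤ ·)) :
    pvGroups l = ((l.map pvKey).dedup).map
      (fun k => (k, l.filter (fun q => pvKey q == k))) := by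
  induction l with
  | nil => rfl
  | cons q l ih =>
    have hs' : ((q :: l).map pvKey).Pairwise (· ≤ ·) := hs
    rw [List.map_cons] at hs'
    obtain ⟨hb, ht⟩ := List.pairwise_cons.mp hs'
    have ihl := ih ht
    by_cases hm : pvKey q ∈ l.map pvKey
    · have hdd := pv_dedup_sorted_cons (l.map pvKey) (pvKey q) hm hb ht
      have hdk : ((q :: l).map pvKey).dedup = (l.map pvKey).dedup := by
        rw [List.map_cons, List.dedup_cons_of_mem hm]
      rw [pvGroups_cons, ihl, hdk, hdd]
      simp only [List.map_cons]
      rw [pvMerge_cons_eq _ _ _ _ rfl]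
      congr 1
      · simp [List.filter_cons]
      · apply List.map_congr_left
        intro k hk
        have hkne : k ≠ pvKey q := by
          have := List.of_mem_filter (List.mem_dedup.mp hk)
          simpa using this
        have hqk : ¬ (pvKey q = k) := fun h => hkne h.symm
        have hfq : (q :: l).filter (fun r => pvKey r == k) = l.filter (fun r => pvKey r == k) := by
          simp [hqk]
        rw [hfq]
    · have hqf : l.filter (fun r => pvKey r == pvKey q) = [] := by
        apply List.filter_eq_nil_iff.mpr
        intro r hr
        simp only [beq_iff_eq]
        exact fun h => hm (h ▸ List.mem_map_of_mem hr)
      have hdk : ((q :: l).map pvKey).dedup = pvKey q :: (l.map pvKey).dedup := by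
        rw [List.map_cons, List.dedup_cons_of_notMem hm]
      have hhead : ((q :: l).filter (fun r => pvKey r == pvKey q)) = [q] := by
        simp [hqf]
      have htail : ∀ k ∈ (l.map pvKey).dedup,
          (q :: l).filter (fun r => pvKey r == k) = l.filter (fun r => pvKey r == k) := by
        intro k hk
        have hkne : pvKey q ≠ k := fun h => hm (h ▸ List.mem_dedup.mp hk)
        simp [hkne]
      rw [hdk, List.map_cons, pvGroups_cons, ihl]
      rcases hdl : (l.map pvKey).dedup with _ | ⟨k2, ks⟩
      · simp [pvMerge_nil, hhead]
      · simp only [List.map_cons]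
        have hk2m : k2 ∈ (l.map pvKey).dedup := by rw [hdl]; exact List.mem_cons_self
        have hk2 : ¬ (k2 = pvKey q) := fun h => hm (h ▸ List.mem_dedup.mp hk2m)
        rw [pvMerge_cons_ne _ _ _ _ hk2]
        congr 1
        · rw [hhead]
        · congr 1
          · rw [htail k2 hk2m]
          · exact List.map_congr_left (fun k hk => by
              rw [htail k (by rw [hdl]; exact List.mem_cons_of_mem _ hk)])

-- B reduced to the same canonical form
theorem pv_B_canon (names : List String) (rel : String) (hpre : names.Nodup) :
    encode_known_text_classes_py_alt names rel
      = PySem.Str.join "\x1f"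
          ((PySem.List.sorted (PySem.Set.ofList (names.map pvKey)) (fun s => s)).map
            (fun k => k ++ "\x1e" ++ PySem.Str.join "\x1d"
              (PySem.List.sorted (names.filter (fun q => pvKey q == k)) (fun q => q)))) := by
  unfold encode_known_text_classes_py_alt
  set L := PySem.List.sorted names (fun q => toLex (pvKey q, q)) with hLdef
  have hperm : L.Perm names := PySem.List.sorted_perm names (fun q => toLex (pvKey q, q)) false
  have hlex : L.Pairwise (fun a b => toLex (pvKey a, a) ≤ toLex (pvKey b, b)) :=
    PySem.List.sorted_pairwise names (fun q => toLex (pvKey q, q))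
  have hnd : L.Nodup := hperm.nodup_iff.mpr hpre
  have hkeys : (L.map pvKey).Pairwise (· ≤ ·) := by
    apply List.pairwise_map.mpr
    refine hlex.imp (fun h => ?_)
    rcases Prod.Lex.toLex_le_toLex.mp h with h1 | ⟨h1, _⟩
    · exact le_of_lt h1
    · exact le_of_eq h1
  -- each group of L is the sorted filter of names
  have hfil : ∀ k, L.filter (fun q => pvKey q == k)
      = PySem.List.sorted (names.filter (fun q => pvKey q == k)) (fun q => q) := by
    intro k
    refine (PySem.List.sorted_eq_of_perm_of_pairwise_lt _ _ (fun q => q)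
      (hperm.filter _) ?_).symm
    have hpw : (L.filter (fun q => pvKey q == k)).Pairwise
        (fun a b => (toLex (pvKey a, a) ≤ toLex (pvKey b, b)) ∧ a ≠ b) :=
      (hlex.and hnd).filter _
    refine hpw.imp_of_mem (fun {a b} ha hb h => ?_)
    have hka : pvKey a = k := by simpa using List.of_mem_filter ha
    have hkb : pvKey b = k := by simpa using List.of_mem_filter hb
    rcases Prod.Lex.toLex_le_toLex.mp h.1 with h1 | ⟨_, h2⟩
    · exact absurd (hka.trans hkb.symm) (ne_of_lt h1)
    · exact lt_of_le_of_ne h2 h.2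
  -- the distinct keys of L, in order, are the sorted distinct suffixes
  have hdk : (L.map pvKey).dedup
      = PySem.List.sorted (PySem.Set.ofList (names.map pvKey)) (fun s => s) := by
    refine (PySem.List.sorted_eq_of_perm_of_pairwise_lt _ _ (fun s => s) ?_ ?_).symm
    · apply (List.perm_ext_iff_of_nodup (List.nodup_dedup _) (PySem.Set.nodup_ofList _)).mpr
      intro a
      rw [List.mem_dedup, PySem.Set.mem_ofList, (hperm.map pvKey).mem_iff]
    · exact pv_pairwise_lt _ (hkeys.sublist (List.dedup_sublist _)) (List.nodup_dedup _)
  rw [pv_fold_groups, pv_groups_eq L hkeys, List.map_map, hdk]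
  apply congrArg
  apply List.map_congr_left
  intro k _
  simp only [Function.comp]
  rw [hfil k]

theorem encode_spec_main (names : List String) (rel : String) (hpre : names.Nodup) :
    encode_known_text_classes_py names rel = encode_known_text_classes_py_alt names rel := by
  rw [pv_A_canon names rel hpre, pv_B_canon names rel hpre]

-- ===== VERDICT (by name: the statement is the Claim_ definition above) =====
theorem encode_known_text_classes_py_spec : Claim_equal_encode_known_text_classes_py := by
  intro names rel _ hpre
  unfold Spec_encode_known_text_classes_py
  exact encode_spec_main names rel hpre
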